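-- pv_equiv track=rewrite | github.com/Contrast-Security-OSS/contrast-ai-smartfix-action | src/qa_handler.py | extract_build_errors
-- ===== SOURCE A (Python) =====
-- def extract_build_errors(build_output):
--     """
--     Extract the most relevant error information from build output.
--
--     This function captures error blocks with context before and after errors,
--     and intelligently extends blocks when errors are found in sequence.
--
--     Args:
--         build_output: The complete output from the build command
--
--     Returns:
--         str: A condensed report of the most relevant error regions
--     """
--     # If output is small enough, just return it all
--     if len(build_output) < 2000:
--         return build_output
--
--     lines = build_output.splitlines()
--
--     # Look at the last part of the output (where errors typically appear)
--     tail_lines = lines[-500:] if len(lines) > 500 else lines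
--
--     # Common error indicators across build systems
--     error_indicators = ["error", "exception", "failed", "failure", "fatal"]
--
--     # Process the lines to find error regions with their context
--     context_size = 5  # Number of lines to include before an error
--     error_regions = []  # Will hold start and end indices of error regions
--
--     # First pass: identify all error lines
--     error_line_indices = []
--     for i, line in enumerate(tail_lines):
--         line_lower = line.lower()
--         if any(indicator in line_lower for indicator in error_indicators):
--             error_line_indices.append(i)
--
--     # Second pass: merge nearby errors into regions
--     if error_line_indices:
--         current_region_start = max(0, error_line_indices[0] - context_size)
--         current_region_end = error_line_indices[0] + context_size
--
--         for idx in error_line_indices[1:]: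
--             # If this error is within or close to current region, extend the region
--             if idx - context_size <= current_region_end + 2:  # Allow small gaps
--                 current_region_end = idx + context_size
--             else:
--                 # This error is far from the previous region, save current region
--                 # and start a new one
--                 error_regions.append((current_region_start, min(current_region_end, len(tail_lines) - 1)))
--                 current_region_start = max(0, idx - context_size)
--                 current_region_end = idx + context_size
--
--         # Don't forget the last region
--         error_regions.append((current_region_start, min(current_region_end, len(tail_lines) - 1)))
--
--     # Extract the text from each error region
--     error_blocks = []
--     for start, end in error_regions:
--         region_lines = tail_lines[start:end + 1]
--         error_blocks.append("\n".join(region_lines))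
--
--     # If we found error blocks, return them (up to 3 most recent)
--     if error_blocks:
--         result_blocks = error_blocks[-3:] if len(error_blocks) > 3 else error_blocks
--         return "BUILD FAILURE - KEY ERRORS:\n\n" + "\n\n...\n\n".join(result_blocks)
--
--     # Fallback: just return the last part of the build output
--     return "BUILD FAILURE - LAST OUTPUT:\n\n" + "\n".join(tail_lines[-50:])
-- ===== SOURCE B (Python) =====
-- # B: instead of A's merge-intervals fold over all error indices, walk the error
-- # indices BACKWARDS from the most recent one, cutting a group wherever two
-- # consecutive error lines are more than 12 apart (12 = two 5-line contexts plus
-- # the 2-line gap tolerance), and stop as soon as the 3 most recent blocks are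
-- # built — the earlier regions A computes and then discards are never formed.
--
-- _ERROR_INDICATORS = ("error", "exception", "failed", "failure", "fatal")
--
--
-- def _is_error_line(line):
--     low = line.lower()
--     return any(ind in low for ind in _ERROR_INDICATORS)
--
--
-- def extract_build_errors(build_output):
--     if len(build_output) < 2000:
--         return build_output
--
--     lines = build_output.splitlines()
--     tail = lines[-500:]
--     n = len(tail)
--
--     errs = [i for i, ln in enumerate(tail) if _is_error_line(ln)]
--     if not errs:
--         return "BUILD FAILURE - LAST OUTPUT:\n\n" + "\n".join(tail[-50:])
--
--     blocks = []  # most recent block first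
--     rev = errs[::-1]
--     while rev and len(blocks) < 3:
--         last = rev[0]
--         first = rev[0]
--         rest = rev[1:]
--         while rest and first - rest[0] <= 12:
--             first = rest[0]
--             rest = rest[1:]
--         blocks.append("\n".join(tail[max(0, first - 5):min(last + 5, n - 1) + 1]))
--         rev = rest
--
--     return "BUILD FAILURE - KEY ERRORS:\n\n" + "\n\n...\n\n".join(reversed(blocks))
-- ===== Notes on version B (the rewrite author's own statement) =====
-- stated objective: alternative
-- what changed: Replaces A's forward merge-intervals fold (collect all error indices, fold them into (start,end) regions with the +2 gap tolerance, extract every region's text, then keep the last 3) by a backward walk over the error indices that cuts a group wherever consecutive error lines are more than 12 apart, emits each of the at most 3 most recent blocks directly from the group's first/last index, and stops early without ever forming the earlier regions A discards.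
import Mathlib
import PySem

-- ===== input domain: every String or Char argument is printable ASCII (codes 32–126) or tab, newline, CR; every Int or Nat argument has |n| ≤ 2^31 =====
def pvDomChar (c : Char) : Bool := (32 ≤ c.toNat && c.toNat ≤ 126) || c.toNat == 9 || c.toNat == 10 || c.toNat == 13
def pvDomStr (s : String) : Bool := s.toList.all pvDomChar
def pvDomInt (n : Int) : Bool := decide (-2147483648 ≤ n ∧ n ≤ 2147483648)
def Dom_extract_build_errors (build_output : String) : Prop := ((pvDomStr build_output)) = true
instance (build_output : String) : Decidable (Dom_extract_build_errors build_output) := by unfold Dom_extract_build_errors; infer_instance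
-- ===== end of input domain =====

-- B replaces A's forward merge-intervals fold over all error indices by a backward,
-- early-stopping walk that cuts groups at gaps > 12 and builds only the ≤3 most
-- recent blocks directly.

-- ===== PORT A =====
-- shared predicate: any(indicator in line.lower() for indicator in error_indicators)
def pvIsErr (line : String) : Bool :=
  ["error", "exception", "failed", "failure", "fatal"].any
    (fun ind => PySem.Str.isIn ind (PySem.Str.lower line))

-- A's second pass step: merge the next error index into the current region or flush it
def pvMergeStep (n : Int) (st : List (Int × Int) × Int × Int) (idx : Int) :
    List (Int × Int) × Int × Int :=
  if idx - 5 ≤ st.2.2 + 2 then (st.1, st.2.1, idx + 5)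
  else (st.1 ++ [(st.2.1, min st.2.2 (n - 1))], max 0 (idx - 5), idx + 5)

-- A's third pass body: "\n".join(tail_lines[start:end + 1])
def pvBlockOf (tl : List String) (r : Int × Int) : String :=
  PySem.Str.join "\n" (PySem.List.slice tl (some r.1) (some (r.2 + 1)))

def extract_build_errors (build_output : String) : String :=
  if PySem.Str.len build_output < 2000 then build_output
  else
    let lines := PySem.Str.splitlines build_output
    let tail_lines := if lines.length > 500 then PySem.List.slice lines (some (-500)) none else lines
    let error_line_indices := (PySem.List.enumerate tail_lines 0).foldl
        (fun acc p => if pvIsErr p.2 then acc ++ [p.1] else acc) ([] : List Int)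
    let error_regions : List (Int × Int) :=
      match error_line_indices with
      | [] => ([] : List (Int × Int))
      | i0 :: rest =>
        let st := rest.foldl (pvMergeStep (tail_lines.length : Int)) ([], max 0 (i0 - 5), i0 + 5)
        st.1 ++ [(st.2.1, min st.2.2 ((tail_lines.length : Int) - 1))]
    let error_blocks := error_regions.foldl (fun acc r => acc ++ [pvBlockOf tail_lines r]) ([] : List String)
    if error_blocks ≠ [] then
      let result_blocks :=
        if error_blocks.length > 3 then PySem.List.slice error_blocks (some (-3)) none else error_blocks
      "BUILD FAILURE - KEY ERRORS:\n\n" ++ PySem.Str.join "\n\n...\n\n" result_blocks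
    else
      "BUILD FAILURE - LAST OUTPUT:\n\n" ++
        PySem.Str.join "\n" (PySem.List.slice tail_lines (some (-50)) none)

-- ===== PORT B =====
-- Source B's inner while: consume error indices (most recent first) while the gap stays ≤ 12
def pvTakeGroup : Int → List Int → Int × List Int
  | first, [] => (first, [])
  | first, i :: r => if first - i ≤ 12 then pvTakeGroup i r else (first, i :: r)

-- Source B's outer while: build up to 3 blocks, most recent first
def pvCollect (tl : List String) (n : Int) : Nat → List Int → List String
  | 0, _ => []
  | _ + 1, [] => []
  | k + 1, last :: rest =>
    let fr := pvTakeGroup last rest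
    PySem.Str.join "\n"
        (PySem.List.slice tl (some (max 0 (fr.1 - 5))) (some (min (last + 5) (n - 1) + 1)))
      :: pvCollect tl n k fr.2

def extract_build_errors_alt (build_output : String) : String :=
  if PySem.Str.len build_output < 2000 then build_output
  else
    let lines := PySem.Str.splitlines build_output
    let tail := PySem.List.slice lines (some (-500)) none
    let n : Int := (tail.length : Int)
    let errs := ((PySem.List.enumerate tail 0).filter (fun p => pvIsErr p.2)).map (·.1)
    if errs = [] then
      "BUILD FAILURE - LAST OUTPUT:\n\n" ++
        PySem.Str.join "\n" (PySem.List.slice tail (some (-50)) none)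
    else
      let blocks := pvCollect tail n 3 errs.reverse
      "BUILD FAILURE - KEY ERRORS:\n\n" ++ PySem.Str.join "\n\n...\n\n" blocks.reverse

-- ===== PRECONDITION & SPEC =====
def Spec_extract_build_errors (build_output : String) (out : String) : Prop := out = extract_build_errors_alt build_output
instance (build_output : String) (out : String) : Decidable (Spec_extract_build_errors build_output out) := by unfold Spec_extract_build_errors; infer_instance

-- ===== CLAIM (what is proved, stated in full; the proofs are below) =====
def Claim_equal_extract_build_errors : Prop := ∀ (build_output : String), Dom_extract_build_errors build_output → Spec_extract_build_errors build_output (extract_build_errors build_output)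

-- ===== LEMMAS AND PROOFS =====

-- grouping of error indices: split at consecutive gaps > 12, remembering (first, last)
def pvGps (f l : Int) : List Int → List (Int × Int)
  | [] => [(f, l)]
  | i :: r => if i ≤ l + 12 then pvGps f i r else (f, l) :: pvGps i i r

def pvGpsAll : List Int → List (Int × Int)
  | [] => []
  | i :: r => pvGps i i r

-- a group's block text, from its (first, last) error indices
def pvClampB (tl : List String) (n : Int) (p : Int × Int) : String :=
  PySem.Str.join "\n"
    (PySem.List.slice tl (some (max 0 (p.1 - 5))) (some (min (p.2 + 5) (n - 1) + 1)))

lemma pvGps_ne_nil (xs : List Int) (f l : Int) : pvGps f l xs ≠ [] := by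
  induction xs generalizing f l with
  | nil => simp [pvGps]
  | cons i r ih => simp only [pvGps]; split <;> simp [ih]

-- xs[-k:] equals A's length-guarded slice
lemma pv_slice_neg_guard {α : Type} (xs : List α) (k : Nat) (hk : 1 < k) :
    (if xs.length > k then PySem.List.slice xs (some (-OfNat.ofNat k)) none else xs)
      = PySem.List.slice xs (some (-OfNat.ofNat k)) none := by
  rw [PySem.List.slice_from_neg_ofNat xs k hk]
  split
  · rfl
  · rename_i h
    rw [Nat.sub_eq_zero_of_le (by omega), List.drop_zero]

-- A's merge fold computes the (clamped) gap-≤12 groups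
lemma pv_fold_gps (n : Int) (rest : List Int) :
    ∀ (acc : List (Int × Int)) (f l : Int),
      (rest.foldl (pvMergeStep n) (acc, max 0 (f - 5), l + 5)).1
        ++ [((rest.foldl (pvMergeStep n) (acc, max 0 (f - 5), l + 5)).2.1,
             min (rest.foldl (pvMergeStep n) (acc, max 0 (f - 5), l + 5)).2.2 (n - 1))]
      = acc ++ (pvGps f l rest).map (fun p => (max 0 (p.1 - 5), min (p.2 + 5) (n - 1))) := by
  induction rest with
  | nil => intro acc f l; simp [pvGps]
  | cons i r ih =>
    intro acc f l
    by_cases h : i ≤ l + 12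
    · simp only [List.foldl_cons, pvMergeStep, if_pos (show i - 5 ≤ l + 5 + 2 by omega),
        pvGps, if_pos h]
      exact ih acc f i
    · simp only [List.foldl_cons, pvMergeStep, if_neg (show ¬ (i - 5 ≤ l + 5 + 2) by omega),
        pvGps, if_neg h, List.map_cons]
      rw [ih (acc ++ [(max 0 (f - 5), min (l + 5) (n - 1))]) i i]
      simp

-- snoc characterization of the grouping, pvGps level
lemma pvGps_snoc (y : Int) (t : List Int) :
    ∀ (f l : Int),
      pvGps f l (t ++ [y]) =
        if y ≤ (l :: t).getLast (by simp) + 12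
        then (pvGps f l t).dropLast ++ [(((pvGps f l t).getLastD (0, 0)).1, y)]
        else pvGps f l t ++ [(y, y)] := by
  induction t with
  | nil => intro f l; simp only [List.nil_append, pvGps, List.getLast_singleton]; split <;> simp
  | cons i t ih =>
    intro f l
    have hlast : (l :: i :: t).getLast (by simp) = (i :: t).getLast (by simp) :=
      List.getLast_cons_cons
    by_cases h : i ≤ l + 12
    · simp only [List.cons_append, pvGps, if_pos h, hlast]
      exact ih f i
    · simp only [List.cons_append, pvGps, if_neg h, hlast]
      rw [ih i i]
      have hne := pvGps_ne_nil t i i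
      obtain ⟨g, G, hG⟩ := List.exists_cons_of_ne_nil hne
      split
      · rw [List.dropLast_cons_of_ne_nil hne, hG]; simp
      · simp

-- snoc characterization of the grouping
lemma pvGpsAll_snoc (xs : List Int) (hxs : xs ≠ []) (y : Int) :
    pvGpsAll (xs ++ [y]) =
      if y ≤ xs.getLast hxs + 12
      then (pvGpsAll xs).dropLast ++ [(((pvGpsAll xs).getLastD (0, 0)).1, y)]
      else pvGpsAll xs ++ [(y, y)] := by
  obtain ⟨x, t, rfl⟩ := List.exists_cons_of_ne_nil hxs
  simpa [pvGpsAll] using pvGps_snoc y t x x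

-- backward grouping peels exactly the last group
lemma pv_takeGroup_gps (rest : List Int) :
    ∀ (last : Int),
      pvGpsAll (rest.reverse ++ [last])
        = pvGpsAll (pvTakeGroup last rest).2.reverse ++ [((pvTakeGroup last rest).1, last)] := by
  induction rest with
  | nil => intro last; simp [pvTakeGroup, pvGpsAll, pvGps]
  | cons i r ih =>
    intro last
    have hrev : (i :: r).reverse = r.reverse ++ [i] := by simp
    have hne : r.reverse ++ [i] ≠ [] := by simp
    have hlast : (r.reverse ++ [i]).getLast hne = i := by rw [List.getLast_congr _ _ rfl]; exact List.getLast_append_singleton _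
    by_cases h : last - i ≤ 12
    · rw [hrev, pvGpsAll_snoc (r.reverse ++ [i]) hne last]
      rw [if_pos (by rw [hlast]; omega)]
      rw [ih i, List.dropLast_concat, List.getLastD_concat]
      simp only [pvTakeGroup, if_pos h]
    · rw [hrev, pvGpsAll_snoc (r.reverse ++ [i]) hne last]
      rw [if_neg (by rw [hlast]; omega)]
      simp only [pvTakeGroup, if_neg h, hrev]

-- B's backward walk computes the last k blocks, most recent first
lemma pv_collect_eq (tl : List String) (n : Int) :
    ∀ (k : Nat) (rev : List Int),
      pvCollect tl n k rev = ((pvGpsAll rev.reverse).reverse.take k).map (pvClampB tl n) := by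
  intro k
  induction k with
  | zero => intro rev; simp [pvCollect]
  | succ k ih =>
    intro rev
    cases rev with
    | nil => simp [pvCollect, pvGpsAll]
    | cons last rest =>
      have hrev : (last :: rest).reverse = rest.reverse ++ [last] := by simp
      rw [hrev, pv_takeGroup_gps rest last]
      simp only [pvCollect, List.reverse_append, List.reverse_singleton, List.singleton_append,
        List.take_succ_cons, List.map_cons]
      exact congrArg₂ (· :: ·) rfl (by rw [ih])

-- ===== VERDICT (by name: the statement is the Claim_ definition above) =====
theorem extract_build_errors_spec : Claim_equal_extract_build_errors := by
  intro bo _hdom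
  unfold Spec_extract_build_errors extract_build_errors extract_build_errors_alt
  by_cases hlen : PySem.Str.len bo < 2000
  · simp only [if_pos hlen]
  · simp only [hlen, if_false]
    rw [pv_slice_neg_guard (PySem.Str.splitlines bo) 500 (by omega)]
    set tl := PySem.List.slice (PySem.Str.splitlines bo) (some (-(500 : Int))) none with htl
    set n : Int := (tl.length : Int) with hn
    rw [PySem.List.foldl_append_if (fun (p : Int × String) => pvIsErr p.2) (fun p => p.1)
      (PySem.List.enumerate tl 0) ([] : List Int)]
    set E := ((PySem.List.enumerate tl 0).filter (fun p => pvIsErr p.2)).map (·.1) with hE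
    cases E with
    | nil => simp
    | cons i0 rest =>
      simp only [List.nil_append, reduceCtorEq, if_false]
      -- A's region fold is the clamped grouping
      have hA := pv_fold_gps n rest ([] : List (Int × Int)) i0 i0
      rw [PySem.List.foldl_append_singleton_eq_map, List.nil_append, hA, List.nil_append]
      have hmap : ((pvGps i0 i0 rest).map
            (fun p => (max 0 (p.1 - 5), min (p.2 + 5) (n - 1)))).map (pvBlockOf tl)
          = (pvGps i0 i0 rest).map (pvClampB tl n) := by
        rw [List.map_map]; rfl
      rw [hmap]
      set G := pvGps i0 i0 rest with hG
      have hGne : G ≠ [] := pvGps_ne_nil rest i0 i0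
      have hBlne : G.map (pvClampB tl n) ≠ [] := by simpa using hGne
      rw [if_pos hBlne]
      rw [pv_slice_neg_guard (G.map (pvClampB tl n)) 3 (by omega),
        PySem.List.slice_from_neg_ofNat _ 3 (by omega)]
      -- B's backward walk gives the last ≤3 blocks, most recent first
      rw [pv_collect_eq tl n 3 (i0 :: rest).reverse]
      rw [List.reverse_reverse]
      have hGall : pvGpsAll (i0 :: rest) = G := rfl
      rw [hGall, ← List.map_reverse, List.take_reverse, List.reverse_reverse,
        ← List.map_drop, List.length_map]
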